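-- pv_equiv track=rewrite | github.com/Sofiamishel2003/Esquemas-de-deteccio-n-y-correccio-n | emisor.py | hamming_emit
-- ===== SOURCE A (Python) =====
-- def hamming_emit(msg_bits: str, verbose: bool = True) -> str:
--     """
--     Implementa el emisor de Hamming siguiendo los pasos de la consigna:
--     1) calcular p con 2^p >= m + p + 1
--     2) crear matriz m_total x 2 (col 1: posición 1..m_total; col 0: bit)
--     3) reservar posiciones de paridad P1,P2,... en potencias de 2
--     4) colocar bits del mensaje en el resto
--     5) para cada Px, crear un stack con bits de posiciones no-paridad cuya pos tenga 1 en el bit x (1-indexado)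
--     6) hacer XOR con pops del stack y asignar el resultado a Px
--     7) concatenar la palabra código
--     """
--     m = len(msg_bits)
--     # calcular p
--     p = 0
--     while (2 ** p) < (m + p + 1):
--         p += 1
--     m_total = m + p
--     # matriz [ [bit], [pos] ] como en el ejemplo (col 0 -> bit, col 1 -> pos)
--     matriz = [[None, str(i + 1)] for i in range(m_total)]
--     # reservar posiciones de paridad (potencias de 2): P1,P2,...
--     posiciones_paridad = set()
--     for i in range(p):
--         pos = 1 << i  # 1,2,4,8,...
--         posiciones_paridad.add(pos)
--         matriz[pos - 1][0] = f"P{i+1}"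
--     # colocar mensaje en posiciones no-paridad
--     j = 0
--     for i in range(m_total):
--         pos = i + 1
--         if pos not in posiciones_paridad:
--             matriz[i][0] = msg_bits[j]
--             j += 1
--     # calcular cada paridad con stack + XOR
--     for k in range(p):
--         pos_paridad = 1 << k
--         mask = pos_paridad  # bit a testear en la posición
--
--         # construir stack con bits elegibles (no-paridad y pos & mask != 0)
--         stack = []
--         posiciones_incluidas = []
--         for i in range(m_total):
--             pos = i + 1
--             if (pos not in posiciones_paridad) and (pos & mask):
--                 stack.append(matriz[i][0][0])  # '0' o '1'
--                 posiciones_incluidas.append(pos)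
--         # XOR acumulado con pops (equivalente a XOR de todos los bits)
--         res = '0'
--         while stack:
--             bit = stack.pop()
--             res = '0' if res == bit else '1'
--         # asignar resultado a la posición de paridad
--         matriz[pos_paridad - 1][0] = res
--     # palabra código
--     codeword = ''.join(matriz[i][0] for i in range(m_total))
--     return codeword
-- ===== SOURCE B (Python) =====
-- def hamming_emit(msg_bits: str, verbose: bool = True) -> str:
--     # Single scatter pass: each data character is appended to the bucket of
--     # every parity bit whose mask covers its position; afterwards each parity
--     # slot is the XOR-combination of its bucket.
--     m = len(msg_bits)
--     p = 0
--     while (1 << p) < m + p + 1: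
--         p += 1
--     covered = [[] for _ in range(p)]
--     slots = []
--     j = 0
--     for pos in range(1, m + p + 1):
--         if pos & (pos - 1) == 0:
--             slots.append(None)          # parity slot, filled below
--         else:
--             c = msg_bits[j]
--             j += 1
--             slots.append(c)
--             for k in range(p):
--                 if (pos >> k) & 1:
--                     covered[k].append(c)
--     for k in range(p):
--         res = '0'
--         for b in reversed(covered[k]):
--             res = '0' if res == b else '1'
--         slots[(1 << k) - 1] = res
--     return ''.join(slots)
-- ===== Notes on version B (the rewrite author's own statement) =====
-- stated objective: alternative
-- what changed: Replaces A's position matrix, parity-position set, message-placement pass and per-parity full rescans by a single scatter pass that appends each data character to the bucket of every parity bit covering its position, then XOR-combines each bucket.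
import Mathlib
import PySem

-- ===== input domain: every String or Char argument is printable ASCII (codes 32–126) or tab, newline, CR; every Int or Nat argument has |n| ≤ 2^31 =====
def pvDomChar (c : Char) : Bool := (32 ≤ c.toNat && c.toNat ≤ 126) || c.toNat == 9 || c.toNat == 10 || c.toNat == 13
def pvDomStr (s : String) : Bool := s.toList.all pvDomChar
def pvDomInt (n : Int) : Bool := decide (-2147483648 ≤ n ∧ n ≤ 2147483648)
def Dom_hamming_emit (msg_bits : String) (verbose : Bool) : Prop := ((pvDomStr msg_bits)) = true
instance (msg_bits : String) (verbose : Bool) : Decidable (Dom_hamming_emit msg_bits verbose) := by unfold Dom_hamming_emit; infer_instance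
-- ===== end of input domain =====

-- B replaces A's matrix + parity-position set + per-parity stack rescans by one
-- scatter pass collecting, per parity bit, the covered data characters, then
-- XOR-combines each bucket; return values proved equal on all inputs
-- (neither function has side effects).

-- ===== PORT A =====
-- A's `while (2 ** p) < (m + p + 1): p += 1`; fuel m+2 always suffices
-- (the least such p is ≤ m+1), so this computes exactly A's p.
def pvPLoop (m : Nat) : Nat → Nat → Nat
  | 0, p => p
  | fuel+1, p => if 2 ^ p < m + p + 1 then pvPLoop m fuel (p+1) else p

-- `res = '0' if res == bit else '1'`
def pvStep1 (res bit : Char) : Char := if res = bit then '0' else '1'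

-- `while stack: bit = stack.pop(); res = ...` — popping from the end of the
-- stack is traversing the reversed stack front to back.
def pvPopLoop : List Char → Char → Char
  | [], res => res
  | bit :: rest, res => pvPopLoop rest (pvStep1 res bit)

-- s[0]; every string this is applied to is nonempty, so headD is exact
def pvHead (s : String) : Char := s.toList.headD ' '

-- `for i in range(p): pos = 1 << i; posiciones_paridad.add(pos); matriz[pos-1][0] = f"P{i+1}"`
-- (matriz is kept as its column 0 only: column 1, str(i+1), is never read by A)
def pvReserve (p : Nat) (mat : List (Option String)) : PySem.Set Nat × List (Option String) :=
  (List.range p).foldl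
    (fun st i =>
      (PySem.Set.add st.1 (1 <<< i), st.2.set ((1 <<< i) - 1) (some ("P" ++ PySem.Int.toStr ((i : Int) + 1)))))
    (PySem.Set.empty, mat)

-- `j = 0; for i in range(n): pos = i+1; if pos not in S: matriz[i][0] = msg_bits[j]; j += 1`
-- (msg.getD is exact: j stays below len(msg) because exactly m positions are non-parity)
def pvPlace (n : Nat) (S : PySem.Set Nat) (msg : List Char) (mat : List (Option String)) :
    List (Option String) × Nat :=
  (List.range n).foldl
    (fun st i =>
      if (i + 1) ∉ S then
        (st.1.set i (some (String.singleton (msg.getD st.2 ' '))), st.2 + 1)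
      else st)
    (mat, 0)

-- `stack = []; for i in range(n): pos = i+1; if (pos not in S) and (pos & mask): stack.append(matriz[i][0][0])`
-- (posiciones_incluidas is built by A but never read — omitted)
def pvStack (n : Nat) (S : PySem.Set Nat) (mask : Nat) (mat : List (Option String)) : List Char :=
  (List.range n).foldl
    (fun acc i =>
      if (i + 1) ∉ S ∧ (i + 1) &&& mask ≠ 0 then acc ++ [pvHead ((mat.getD i none).getD "")]
      else acc)
    []

-- `for k in range(p): ... res = XOR-pops ...; matriz[(1<<k)-1][0] = res`
def pvParityPass (p T : Nat) (S : PySem.Set Nat) (mat : List (Option String)) : List (Option String) :=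
  (List.range p).foldl
    (fun mat k =>
      let stack := pvStack T S (1 <<< k) mat
      let res := pvPopLoop stack.reverse '0'
      mat.set ((1 <<< k) - 1) (some (String.singleton res)))
    mat

def hamming_emit (msg_bits : String) (verbose : Bool) : String :=
  let msg := msg_bits.toList
  let m := msg.length
  let p := pvPLoop m (m + 2) 0
  let mTotal := m + p
  let matriz : List (Option String) := (List.range mTotal).map (fun _ => none)
  let rm := pvReserve p matriz
  let pm := pvPlace mTotal rm.1 msg rm.2
  let mat := pvParityPass p mTotal rm.1 pm.1
  PySem.Str.join "" ((List.range mTotal).map (fun i => (mat.getD i none).getD ""))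

-- ===== PORT B =====
-- Source B's `res = '0'; for b in reversed(covered[k]): res = '0' if res == b else '1'`
def pvRed (bits : List Char) : Char :=
  bits.reverse.foldl (fun res b => if res = b then '0' else '1') '0'

-- Source B's main loop over pos in range(1, m+p+1); state = (covered, slots, j);
-- the inner `for k in range(p): if (pos >> k) & 1: covered[k].append(c)`
def pvScatter (p : Nat) (msg : List Char) (n : Nat) :
    List (List Char) × List (Option String) × Nat :=
  (List.range' 1 n).foldl
    (fun st pos =>
      if pos &&& (pos - 1) = 0 then (st.1, st.2.1 ++ [none], st.2.2)
      else
        ((List.range p).map (fun k =>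
            if (pos >>> k) &&& 1 ≠ 0 then st.1.getD k [] ++ [msg.getD st.2.2 ' ']
            else st.1.getD k []),
         st.2.1 ++ [some (String.singleton (msg.getD st.2.2 ' '))], st.2.2 + 1))
    (List.replicate p [], [], 0)

-- `for k in range(p): ... slots[(1 << k) - 1] = res`
def pvFillPar (n : Nat) (cov : List (List Char)) (sl : List (Option String)) :
    List (Option String) :=
  (List.range n).foldl
    (fun sl k => sl.set ((1 <<< k) - 1) (some (String.singleton (pvRed (cov.getD k []))))) sl

def hamming_emit_alt (msg_bits : String) (verbose : Bool) : String :=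
  let msg := msg_bits.toList
  let m := msg.length
  let p := pvPLoop m (m + 2) 0   -- Source B's p-loop is A's identical while loop
  let mTotal := m + p
  let sc := pvScatter p msg mTotal
  let slots := pvFillPar p sc.1 sc.2.1
  PySem.Str.join "" (slots.map (fun s => s.getD ""))

-- ===== PRECONDITION & SPEC =====
def Spec_hamming_emit (msg_bits : String) (verbose : Bool) (out : String) : Prop := out = hamming_emit_alt msg_bits verbose
instance (msg_bits : String) (verbose : Bool) (out : String) : Decidable (Spec_hamming_emit msg_bits verbose out) := by unfold Spec_hamming_emit; infer_instance

-- ===== CLAIM (what is proved, stated in full; the proofs are below) =====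
def Claim_equal_hamming_emit : Prop := ∀ (msg_bits : String) (verbose : Bool), Dom_hamming_emit msg_bits verbose → Spec_hamming_emit msg_bits verbose (hamming_emit msg_bits verbose)

-- ===== LEMMAS AND PROOFS =====

-- spec-side vocabulary (used only by the proofs)
def pvIsP2 (pos : Nat) : Bool := decide (pos &&& (pos - 1) = 0)

def pvDIdx (pos : Nat) : Nat := (List.range' 1 (pos - 1)).countP (fun q => !pvIsP2 q)

def pvElig (msg : List Char) (n k : Nat) : List Char :=
  ((List.range' 1 n).filter (fun pos => !pvIsP2 pos && pos.testBit k)).map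
    (fun pos => msg.getD (pvDIdx pos) ' ')

def pvParChar (msg : List Char) (n k : Nat) : Char := pvPopLoop (pvElig msg n k).reverse '0'

def pvSpecStrs (msg : List Char) (T : Nat) : List String :=
  (List.range' 1 T).map (fun pos =>
    if pvIsP2 pos then String.singleton (pvParChar msg T (Nat.log 2 pos))
    else String.singleton (msg.getD (pvDIdx pos) ' '))

-- ---- the p loop ----
lemma pvPLoop_spec (m : Nat) : ∀ fuel q, m + (q + fuel) + 1 ≤ 2 ^ (q + fuel) →
    q ≤ pvPLoop m fuel q ∧ m + pvPLoop m fuel q + 1 ≤ 2 ^ pvPLoop m fuel q ∧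
      ∀ r, q ≤ r → r < pvPLoop m fuel q → 2 ^ r < m + r + 1 := by
  intro fuel
  induction fuel with
  | zero =>
      intro q h
      simp only [Nat.add_zero] at h
      exact ⟨Nat.le_refl q, by simpa [pvPLoop] using h, fun r h1 h2 => by simp [pvPLoop] at h2; omega⟩
  | succ n ih =>
      intro q h
      simp only [pvPLoop]
      by_cases hc : 2 ^ q < m + q + 1
      · simp only [if_pos hc]
        have h' : m + (q + 1 + n) + 1 ≤ 2 ^ (q + 1 + n) := by
          have he : q + 1 + n = q + (n + 1) := by omega
          rw [he]; exact h
        obtain ⟨h1, h2, h3⟩ := ih (q + 1) h'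
        refine ⟨by omega, h2, ?_⟩
        intro r hr1 hr2
        rcases Nat.eq_or_lt_of_le hr1 with he | hl
        · rw [← he]; exact hc
        · exact h3 r (by omega) hr2
      · simp only [if_neg hc]
        exact ⟨Nat.le_refl q, by omega, fun r h1 h2 => by omega⟩

lemma pvPKey (m : Nat) : m + (0 + (m + 2)) + 1 ≤ 2 ^ (0 + (m + 2)) := by
  have hm : m < 2 ^ m := Nat.lt_two_pow_self
  have h4 : (2 : Nat) ^ (0 + (m + 2)) = 4 * 2 ^ m := by
    rw [Nat.zero_add, pow_add]; ring
  omega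

lemma pvP_ge (m : Nat) : m + pvPLoop m (m + 2) 0 + 1 ≤ 2 ^ pvPLoop m (m + 2) 0 :=
  (pvPLoop_spec m (m + 2) 0 (pvPKey m)).2.1

lemma pvP_min (m : Nat) : ∀ r < pvPLoop m (m + 2) 0, 2 ^ r < m + r + 1 :=
  fun r hr => (pvPLoop_spec m (m + 2) 0 (pvPKey m)).2.2 r (Nat.zero_le r) hr

lemma pvP_pow_le (m : Nat) (k : Nat) (hk : k < pvPLoop m (m + 2) 0) :
    2 ^ k ≤ m + pvPLoop m (m + 2) 0 := by
  have h1 := pvP_min m k hk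
  omega

-- ---- powers of two ----
lemma pvTestBit_div (x i : Nat) : x.testBit i = decide (x / 2 ^ i % 2 = 1) := by
  simp only [Nat.testBit, Nat.one_and_eq_mod_two, Nat.shiftRight_eq_div_pow]
  rcases Nat.mod_two_eq_zero_or_one (x / 2 ^ i) with h | h <;> simp [h]

lemma pow2_iff (pos : Nat) (h : 0 < pos) : pvIsP2 pos = true ↔ ∃ k, pos = 2 ^ k := by
  unfold pvIsP2
  simp only [decide_eq_true_eq]
  constructor
  · intro h0
    by_contra hne
    push_neg at hne
    have hle : 2 ^ Nat.log 2 pos ≤ pos := Nat.pow_log_le_self 2 (by omega)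
    have hlt : pos < 2 ^ (Nat.log 2 pos + 1) := Nat.lt_pow_succ_log_self (by norm_num) pos
    have hgt : 2 ^ Nat.log 2 pos < pos := lt_of_le_of_ne hle (fun he => hne (Nat.log 2 pos) he.symm)
    rw [pow_succ] at hlt
    have hdiv1 : pos / 2 ^ Nat.log 2 pos = 1 :=
      Nat.div_eq_of_lt_le (by omega) (by omega)
    have hdiv2 : (pos - 1) / 2 ^ Nat.log 2 pos = 1 :=
      Nat.div_eq_of_lt_le (by omega) (by omega)
    have ht1 : pos.testBit (Nat.log 2 pos) = true := by
      rw [pvTestBit_div, hdiv1]; simp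
    have ht2 : (pos - 1).testBit (Nat.log 2 pos) = true := by
      rw [pvTestBit_div, hdiv2]; simp
    have hb : (pos &&& (pos - 1)).testBit (Nat.log 2 pos) = true := by
      rw [Nat.testBit_and, ht1, ht2]; rfl
    rw [h0] at hb
    simp [Nat.zero_testBit] at hb
  · rintro ⟨k, rfl⟩
    refine Nat.eq_of_testBit_eq fun i => ?_
    rw [Nat.testBit_and, Nat.testBit_two_pow_sub_one, Nat.zero_testBit]
    rcases eq_or_ne k i with rfl | hne
    · simp
    · simp [Nat.testBit_two_pow_of_ne hne]

lemma hit_eq (pos k : Nat) : (pos >>> k) &&& 1 = if pos.testBit k then 1 else 0 := by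
  rw [pvTestBit_div, Nat.land_comm, Nat.one_and_eq_mod_two, Nat.shiftRight_eq_div_pow]
  rcases Nat.mod_two_eq_zero_or_one (pos / 2 ^ k) with h | h <;> simp [h]

lemma and_pow_ne (pos k : Nat) : (pos &&& 2 ^ k ≠ 0) ↔ pos.testBit k = true := by
  rw [Nat.and_two_pow]
  cases h : pos.testBit k
  · simp
  · simp [(Nat.two_pow_pos k).ne']

-- ---- A's pop loop is a left fold ----
lemma pvPopLoop_eq_foldl : ∀ (xs : List Char) (r : Char),
    pvPopLoop xs r = xs.foldl pvStep1 r := by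
  intro xs
  induction xs with
  | nil => intro r; rfl
  | cons b xs ih => intro r; simp only [pvPopLoop, List.foldl_cons]; exact ih _

lemma pvRed_eq (l : List Char) : pvRed l = pvPopLoop l.reverse '0' := by
  rw [pvPopLoop_eq_foldl]
  rfl

-- ---- A side: reservation ----
lemma pvReserve_succ (p : Nat) (mat : List (Option String)) :
    pvReserve (p + 1) mat =
      ((pvReserve p mat).1.add (1 <<< p),
        (pvReserve p mat).2.set ((1 <<< p) - 1) (some ("P" ++ PySem.Int.toStr ((p : Int) + 1)))) := by
  unfold pvReserve
  rw [List.range_succ, List.foldl_concat]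

lemma pvReserve_len (p : Nat) (mat : List (Option String)) :
    (pvReserve p mat).2.length = mat.length := by
  induction p with
  | zero => rfl
  | succ p ih => rw [pvReserve_succ]; simp [ih]

lemma pvReserve_mem (p : Nat) (mat : List (Option String)) (pos : Nat) :
    pos ∈ (pvReserve p mat).1 ↔ ∃ k < p, pos = 2 ^ k := by
  induction p with
  | zero =>
      simp [pvReserve, PySem.Set.empty]
  | succ p ih =>
      rw [pvReserve_succ]
      simp only []
      rw [PySem.Set.mem_add, ih]
      constructor
      · rintro (⟨k, hk, rfl⟩ | h)
        · exact ⟨k, by omega, rfl⟩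
        · exact ⟨p, by omega, by rw [h, Nat.shiftLeft_eq, one_mul]⟩
      · rintro ⟨k, hk, rfl⟩
        rcases Nat.lt_succ_iff_lt_or_eq.mp hk with h | rfl
        · exact Or.inl ⟨k, h, rfl⟩
        · exact Or.inr (by rw [Nat.shiftLeft_eq, one_mul])

-- ---- A side: placement ----
lemma pvPlace_succ (n : Nat) (S : PySem.Set Nat) (msg : List Char) (mat : List (Option String)) :
    pvPlace (n + 1) S msg mat =
      (if (n + 1) ∉ S then
        ((pvPlace n S msg mat).1.set n
            (some (String.singleton (msg.getD (pvPlace n S msg mat).2 ' '))),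
          (pvPlace n S msg mat).2 + 1)
      else pvPlace n S msg mat) := by
  unfold pvPlace
  rw [List.range_succ, List.foldl_concat]

lemma pvPlace_spec (S : PySem.Set Nat) (msg : List Char) (mat : List (Option String)) :
    ∀ n, n ≤ mat.length →
      (pvPlace n S msg mat).2 = (List.range n).countP (fun q => !decide ((q + 1) ∈ S)) ∧
      (pvPlace n S msg mat).1.length = mat.length ∧
      ∀ i, (pvPlace n S msg mat).1[i]? =
        if i < n ∧ (i + 1) ∉ S then
          some (some (String.singleton (msg.getD ((List.range i).countP (fun q => !decide ((q + 1) ∈ S))) ' ')))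
        else mat[i]? := by
  intro n
  induction n with
  | zero =>
      intro _
      refine ⟨rfl, rfl, fun i => ?_⟩
      rw [if_neg (by omega)]
      rfl
  | succ n ih =>
      intro hn
      obtain ⟨hj, hlen, hget⟩ := ih (by omega)
      have hcnt : (List.range (n + 1)).countP (fun q => !decide ((q + 1) ∈ S)) =
          (List.range n).countP (fun q => !decide ((q + 1) ∈ S)) +
            (if (n + 1) ∉ S then 1 else 0) := by
        rw [List.range_succ, List.countP_append]
        by_cases h : (n + 1) ∈ S <;> simp [List.countP_cons, h]
      rw [pvPlace_succ]
      by_cases hS : (n + 1) ∈ S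
      · rw [if_neg (by simpa using hS)]
        refine ⟨by rw [hcnt]; simp [hS, hj], hlen, fun i => ?_⟩
        rw [hget i]
        by_cases h1 : i < n ∧ (i + 1) ∉ S
        · rw [if_pos h1, if_pos ⟨by omega, h1.2⟩]
        · rw [if_neg h1, if_neg (by
            rintro ⟨hi, hmem⟩
            rcases Nat.lt_succ_iff_lt_or_eq.mp hi with h | rfl
            · exact h1 ⟨h, hmem⟩
            · exact hmem hS)]
      · rw [if_pos hS]
        refine ⟨by simp [hcnt, hS, hj], by simp [hlen], fun i => ?_⟩
        rw [List.getElem?_set]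
        rcases eq_or_ne n i with rfl | hne
        · rw [if_pos rfl, if_pos (by omega), if_pos ⟨by omega, hS⟩, hj]
        · rw [if_neg hne, hget i]
          by_cases h1 : i < n ∧ (i + 1) ∉ S
          · rw [if_pos h1, if_pos ⟨by omega, h1.2⟩]
          · rw [if_neg h1, if_neg (by
              rintro ⟨hi, hmem⟩
              rcases Nat.lt_succ_iff_lt_or_eq.mp hi with h | he
              · exact h1 ⟨h, hmem⟩
              · exact hne he.symm)]

-- ---- A side: the stack ----
lemma pvStack_succ (n : Nat) (S : PySem.Set Nat) (mask : Nat) (mat : List (Option String)) :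
    pvStack (n + 1) S mask mat =
      (if (n + 1) ∉ S ∧ (n + 1) &&& mask ≠ 0 then
        pvStack n S mask mat ++ [pvHead ((mat.getD n none).getD "")]
      else pvStack n S mask mat) := by
  unfold pvStack
  rw [List.range_succ, List.foldl_concat]

lemma pvStack_spec (n : Nat) (S : PySem.Set Nat) (mask : Nat) (mat : List (Option String)) :
    pvStack n S mask mat =
      ((List.range n).filter (fun i => decide ((i + 1) ∉ S) && decide ((i + 1) &&& mask ≠ 0))).map
        (fun i => pvHead ((mat.getD i none).getD "")) := by
  induction n with
  | zero => rfl
  | succ n ih =>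
      rw [pvStack_succ, List.range_succ, List.filter_append, List.map_append, ← ih]
      by_cases h : (n + 1) ∉ S ∧ (n + 1) &&& mask ≠ 0
      · rw [if_pos h]
        simp [List.filter_cons, h.1, h.2]
      · rw [if_neg h]
        have hb : (decide ((n + 1) ∉ S) && decide ((n + 1) &&& mask ≠ 0)) = false := by
          by_cases h1 : (n + 1) ∈ S
          · simp [h1]
          · simp only [h1, not_false_iff, decide_true, Bool.true_and]
            simp only [decide_eq_false_iff_not, Decidable.not_not]
            by_contra hne
            exact h ⟨h1, hne⟩
        simp only [List.filter_cons, hb]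
        simp [hb]

-- ---- fixed quantities of a run (proof-side names) ----
def pvPp (msg : List Char) : Nat := pvPLoop msg.length (msg.length + 2) 0

def pvT (msg : List Char) : Nat := msg.length + pvPp msg

def pvMat0 (msg : List Char) : List (Option String) := (List.range (pvT msg)).map (fun _ => none)

def pvS (msg : List Char) : PySem.Set Nat := (pvReserve (pvPp msg) (pvMat0 msg)).1

def pvM2 (msg : List Char) : List (Option String) :=
  (pvPlace (pvT msg) (pvS msg) msg (pvReserve (pvPp msg) (pvMat0 msg)).2).1

lemma pvT_lt_pow (msg : List Char) : pvT msg < 2 ^ pvPp msg := by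
  have := pvP_ge msg.length
  unfold pvT pvPp
  omega

lemma pvS_mem (msg : List Char) (pos : Nat) :
    pos ∈ pvS msg ↔ ∃ k < pvPp msg, pos = 2 ^ k := pvReserve_mem _ _ _

lemma pvExists_lt (msg : List Char) (pos : Nat) (h1 : 1 ≤ pos) (h2 : pos ≤ pvT msg) :
    (∃ k < pvPp msg, pos = 2 ^ k) ↔ pvIsP2 pos = true := by
  rw [pow2_iff pos (by omega)]
  constructor
  · rintro ⟨k, _, rfl⟩; exact ⟨k, rfl⟩
  · rintro ⟨k, rfl⟩
    refine ⟨k, ?_, rfl⟩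
    have hlt : 2 ^ k < 2 ^ pvPp msg := lt_of_le_of_lt h2 (pvT_lt_pow msg)
    exact (Nat.pow_lt_pow_iff_right (by norm_num)).mp hlt

lemma pvS_isP2 (msg : List Char) (pos : Nat) (h1 : 1 ≤ pos) (h2 : pos ≤ pvT msg) :
    pos ∈ pvS msg ↔ pvIsP2 pos = true := by
  rw [pvS_mem, pvExists_lt msg pos h1 h2]

lemma pvCnt_eq (msg : List Char) (i : Nat) (hi : i ≤ pvT msg) :
    (List.range i).countP (fun q => !decide ((q + 1) ∈ pvS msg)) = pvDIdx (i + 1) := by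
  unfold pvDIdx
  rw [Nat.add_sub_cancel, List.range'_eq_map_range, List.countP_map]
  refine List.countP_congr fun q hq => ?_
  have hq' : q < i := List.mem_range.mp hq
  have hmem := pvS_isP2 msg (q + 1) (by omega) (by omega)
  simp only [Function.comp, Bool.not_eq_eq_eq_not, Bool.not_true, decide_eq_false_iff_not,
    Bool.not_eq_true]
  constructor
  · intro h
    rw [show 1 + q = q + 1 by omega]
    rw [← Bool.not_eq_true]
    intro hP
    exact h (hmem.mpr hP)
  · intro h hmem2
    have := hmem.mp hmem2
    rw [show 1 + q = q + 1 by omega] at h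
    rw [h] at this
    exact Bool.false_ne_true this

lemma pvM2_len (msg : List Char) : (pvM2 msg).length = pvT msg := by
  unfold pvM2
  have h1 : (pvReserve (pvPp msg) (pvMat0 msg)).2.length = pvT msg := by
    rw [pvReserve_len]; simp [pvMat0]
  rw [(pvPlace_spec (pvS msg) msg _ (pvT msg) (by omega)).2.1, h1]

lemma pvM2_data (msg : List Char) (i : Nat) (hi : i < pvT msg) (hd : pvIsP2 (i + 1) = false) :
    (pvM2 msg)[i]? = some (some (String.singleton (msg.getD (pvDIdx (i + 1)) ' '))) := by
  unfold pvM2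
  have h1 : (pvReserve (pvPp msg) (pvMat0 msg)).2.length = pvT msg := by
    rw [pvReserve_len]; simp [pvMat0]
  have hnot : (i + 1) ∉ pvS msg := by
    rw [pvS_isP2 msg (i + 1) (by omega) (by omega), hd]
    simp
  rw [(pvPlace_spec (pvS msg) msg _ (pvT msg) (by omega)).2.2 i,
    if_pos ⟨hi, hnot⟩, pvCnt_eq msg i (by omega)]

-- any matrix whose data entries agree with pvM2 yields the eligible-chars list
lemma pvStack_elig (msg : List Char) (mat : List (Option String))
    (hlen : mat.length = pvT msg)
    (hdata : ∀ i, i < pvT msg → pvIsP2 (i + 1) = false → mat[i]? = (pvM2 msg)[i]?)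
    (k : Nat) :
    pvStack (pvT msg) (pvS msg) (2 ^ k) mat = pvElig msg (pvT msg) k := by
  rw [pvStack_spec]
  unfold pvElig
  rw [List.range'_eq_map_range, List.filter_map, List.map_map]
  have hfilter : (List.range (pvT msg)).filter
        (fun i => decide ((i + 1) ∉ pvS msg) && decide ((i + 1) &&& 2 ^ k ≠ 0)) =
      (List.range (pvT msg)).filter ((fun pos => !pvIsP2 pos && pos.testBit k) ∘ (fun x => 1 + x)) := by
    refine List.filter_congr fun i hi => ?_
    have hi' : i < pvT msg := List.mem_range.mp hi
    have hmem := pvS_isP2 msg (i + 1) (by omega) (by omega)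
    have h1 : decide ((i + 1) ∉ pvS msg) = !pvIsP2 (1 + i) := by
      rw [show 1 + i = i + 1 by omega]
      by_cases h : pvIsP2 (i + 1) = true
      · simp [h, hmem.mpr h]
      · have hb : pvIsP2 (i + 1) = false := by
          rw [← Bool.not_eq_true]; exact h
        have hnm : (i + 1) ∉ pvS msg := fun hm => h (hmem.mp hm)
        simp [hb, hnm]
    have h2 : decide ((i + 1) &&& 2 ^ k ≠ 0) = (1 + i).testBit k := by
      rw [show 1 + i = i + 1 by omega]
      by_cases h : (i + 1).testBit k = true
      · simp [h, (and_pow_ne (i + 1) k).mpr h]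
      · have hb : (i + 1).testBit k = false := by rw [← Bool.not_eq_true]; exact h
        have : ¬((i + 1) &&& 2 ^ k ≠ 0) := fun hne => h ((and_pow_ne (i + 1) k).mp hne)
        simp [hb, this]
    simp only [Function.comp]
    rw [h1, h2]
  rw [hfilter]
  refine List.map_congr_left fun i hi => ?_
  have hi2 := List.mem_filter.mp hi
  have hi' : i < pvT msg := List.mem_range.mp hi2.1
  have hpred := hi2.2
  simp only [Function.comp, Bool.and_eq_true, Bool.not_eq_true'] at hpred
  have hd : pvIsP2 (i + 1) = false := by rw [show i + 1 = 1 + i by omega]; exact hpred.1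
  have hmat : mat[i]? = some (some (String.singleton (msg.getD (pvDIdx (i + 1)) ' '))) := by
    rw [hdata i hi' hd, pvM2_data msg i hi' hd]
  have hilen : i < mat.length := by omega
  have hgetD : mat.getD i none = some (String.singleton (msg.getD (pvDIdx (i + 1)) ' ')) := by
    rw [List.getD_eq_getElem?_getD, hmat]
    rfl
  rw [hgetD]
  simp only [Function.comp_apply, Option.getD_some]
  rw [show (1 : Nat) + i = i + 1 from Nat.add_comm 1 i]
  simp [pvHead]

-- ---- A side: the parity pass ----
lemma pvParityPass_succ (n T : Nat) (S : PySem.Set Nat) (mat : List (Option String)) :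
    pvParityPass (n + 1) T S mat =
      (pvParityPass n T S mat).set ((1 <<< n) - 1)
        (some (String.singleton
          (pvPopLoop (pvStack T S (1 <<< n) (pvParityPass n T S mat)).reverse '0'))) := by
  unfold pvParityPass
  rw [List.range_succ, List.foldl_concat]

lemma pvParityPass_inv (msg : List Char) : ∀ n, n ≤ pvPp msg →
    (pvParityPass n (pvT msg) (pvS msg) (pvM2 msg)).length = pvT msg ∧
    ∀ i, (pvParityPass n (pvT msg) (pvS msg) (pvM2 msg))[i]? =
      if ∃ k < n, i + 1 = 2 ^ k then
        some (some (String.singleton (pvParChar msg (pvT msg) (Nat.log 2 (i + 1)))))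
      else (pvM2 msg)[i]? := by
  intro n
  induction n with
  | zero =>
      intro _
      refine ⟨pvM2_len msg, fun i => ?_⟩
      rw [if_neg (by rintro ⟨k, hk, _⟩; omega)]
      rfl
  | succ n ih =>
      intro hn
      obtain ⟨hlen, hget⟩ := ih (by omega)
      have hdata : ∀ i, i < pvT msg → pvIsP2 (i + 1) = false →
          (pvParityPass n (pvT msg) (pvS msg) (pvM2 msg))[i]? = (pvM2 msg)[i]? := by
        intro i hi hd
        rw [hget i, if_neg]
        rintro ⟨k, hk, he⟩
        have : pvIsP2 (i + 1) = true := (pow2_iff (i + 1) (by omega)).mpr ⟨k, he⟩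
        rw [hd] at this
        exact Bool.false_ne_true this
      have hstack := pvStack_elig msg _ hlen hdata n
      rw [pvParityPass_succ]
      have hsl : (1 : Nat) <<< n = 2 ^ n := by rw [Nat.shiftLeft_eq, one_mul]
      have hidx : 2 ^ n - 1 < pvT msg := by
        have hp : pvPp msg = pvPLoop msg.length (msg.length + 2) 0 := rfl
        have ht : pvT msg = msg.length + pvPLoop msg.length (msg.length + 2) 0 := rfl
        have h1 := pvP_pow_le msg.length n (by omega)
        have hpow : (1 : Nat) ≤ 2 ^ n := Nat.one_le_two_pow
        omega
      refine ⟨by simp [hlen], fun i => ?_⟩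
      rw [List.getElem?_set]
      rcases eq_or_ne ((1 <<< n) - 1) i with he | hne
      · rw [if_pos he, if_pos (by omega)]
        have hie : i + 1 = 2 ^ n := by
          have hpow : (1 : Nat) ≤ 2 ^ n := Nat.one_le_two_pow
          omega
        rw [if_pos ⟨n, by omega, hie⟩]
        rw [hsl, hstack, hie, Nat.log_pow (by norm_num)]
        rfl
      · rw [if_neg hne, hget i]
        have hie : i + 1 ≠ 2 ^ n := by
          intro he2
          apply hne
          rw [hsl]
          omega
        by_cases h1 : ∃ k < n, i + 1 = 2 ^ k
        · rw [if_pos h1, if_pos (by obtain ⟨k, hk, he2⟩ := h1; exact ⟨k, by omega, he2⟩)]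
        · rw [if_neg h1, if_neg (by
            rintro ⟨k, hk, he2⟩
            rcases Nat.lt_succ_iff_lt_or_eq.mp hk with h | rfl
            · exact h1 ⟨k, h, he2⟩
            · exact hie he2)]

lemma pvA_eq_spec (msg : List Char) :
    (List.range (pvT msg)).map (fun i =>
        ((pvParityPass (pvPp msg) (pvT msg) (pvS msg) (pvM2 msg)).getD i none).getD "")
      = pvSpecStrs msg (pvT msg) := by
  obtain ⟨hlen, hget⟩ := pvParityPass_inv msg (pvPp msg) (Nat.le_refl _)
  unfold pvSpecStrs
  rw [List.range'_eq_map_range, List.map_map]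
  refine List.map_congr_left fun i hi => ?_
  have hi' : i < pvT msg := List.mem_range.mp hi
  simp only [Function.comp]
  rw [show (1 : Nat) + i = i + 1 from Nat.add_comm 1 i]
  rw [List.getD_eq_getElem?_getD, hget i]
  by_cases hP : pvIsP2 (i + 1) = true
  · have hex := (pvExists_lt msg (i + 1) (by omega) (by omega)).mpr hP
    rw [if_pos hex, if_pos hP]
    rfl
  · have hd : pvIsP2 (i + 1) = false := by rw [← Bool.not_eq_true]; exact hP
    have hnex : ¬∃ k < pvPp msg, i + 1 = 2 ^ k :=
      fun hex => hP ((pvExists_lt msg (i + 1) (by omega) (by omega)).mp hex)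
    rw [if_neg hnex, pvM2_data msg i hi' hd, if_neg hP]
    rfl

-- ---- B side ----
lemma pvRange'_concat (n : Nat) : List.range' 1 (n + 1) = List.range' 1 n ++ [1 + n] := by
  rw [List.range'_concat]
  simp

lemma pvScatter_succ (p : Nat) (msg : List Char) (n : Nat) :
    pvScatter p msg (n + 1) =
      (if (1 + n) &&& (1 + n - 1) = 0 then
        ((pvScatter p msg n).1, (pvScatter p msg n).2.1 ++ [none], (pvScatter p msg n).2.2)
      else
        ((List.range p).map (fun k =>
            if ((1 + n) >>> k) &&& 1 ≠ 0 then
              (pvScatter p msg n).1.getD k [] ++ [msg.getD (pvScatter p msg n).2.2 ' ']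
            else (pvScatter p msg n).1.getD k []),
         (pvScatter p msg n).2.1 ++
           [some (String.singleton (msg.getD (pvScatter p msg n).2.2 ' '))],
         (pvScatter p msg n).2.2 + 1)) := by
  unfold pvScatter
  rw [pvRange'_concat, List.foldl_concat]

lemma pvDIdx_eq (n : Nat) :
    pvDIdx (1 + n) = (List.range' 1 n).countP (fun pos => !pvIsP2 pos) := by
  unfold pvDIdx
  norm_num

lemma pvElig_succ (msg : List Char) (n k : Nat) :
    pvElig msg (n + 1) k =
      pvElig msg n k ++
        (if !pvIsP2 (1 + n) && (1 + n).testBit k then [msg.getD (pvDIdx (1 + n)) ' '] else []) := by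
  unfold pvElig
  rw [pvRange'_concat, List.filter_append, List.map_append]
  by_cases h : (!pvIsP2 (1 + n) && (1 + n).testBit k) = true
  · rw [if_pos h]
    simp [List.filter_cons, h]
  · rw [if_neg h]
    have hb : (!pvIsP2 (1 + n) && (1 + n).testBit k) = false := by
      rw [← Bool.not_eq_true]; exact h
    simp [List.filter_cons, hb]

lemma pvScatter_spec (p : Nat) (msg : List Char) : ∀ n : Nat,
    (pvScatter p msg n).2.2 = (List.range' 1 n).countP (fun pos => !pvIsP2 pos) ∧
    (pvScatter p msg n).2.1 =
      (List.range' 1 n).map (fun pos =>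
        if pvIsP2 pos then none else some (String.singleton (msg.getD (pvDIdx pos) ' '))) ∧
    (pvScatter p msg n).1.length = p ∧
    ∀ k, k < p →
      (pvScatter p msg n).1.getD k [] = pvElig msg n k := by
  intro n
  induction n with
  | zero =>
      refine ⟨rfl, rfl, by simp [pvScatter], fun k hk => ?_⟩
      show (List.replicate p ([] : List Char)).getD k [] = _
      rw [List.getD_eq_getElem?_getD]
      simp [List.getElem?_replicate, hk, pvElig]
  | succ n ih =>
      obtain ⟨hj, hsl, hlen, hst⟩ := ih
      rw [pvScatter_succ]
      have hcnt : (List.range' 1 (n + 1)).countP (fun pos => !pvIsP2 pos) =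
          (List.range' 1 n).countP (fun pos => !pvIsP2 pos) +
            (if pvIsP2 (1 + n) then 0 else 1) := by
        rw [pvRange'_concat, List.countP_append]
        by_cases h : pvIsP2 (1 + n) = true
        · simp [List.countP_cons, h]
        · have hb : pvIsP2 (1 + n) = false := by rw [← Bool.not_eq_true]; exact h
          simp [List.countP_cons, hb]
      have hmap : (List.range' 1 (n + 1)).map (fun pos =>
            if pvIsP2 pos then none
            else some (String.singleton (msg.getD (pvDIdx pos) ' '))) =
          (List.range' 1 n).map (fun pos =>
            if pvIsP2 pos then none
            else some (String.singleton (msg.getD (pvDIdx pos) ' '))) ++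
            [if pvIsP2 (1 + n) then none
             else some (String.singleton (msg.getD (pvDIdx (1 + n)) ' '))] := by
        rw [pvRange'_concat, List.map_append]
        rfl
      by_cases hP : pvIsP2 (1 + n) = true
      · have hc : (1 + n) &&& (1 + n - 1) = 0 := by
          have := hP
          unfold pvIsP2 at this
          simpa using this
        rw [if_pos hc]
        refine ⟨by simp [hj, hcnt, hP], by rw [hsl, hmap, hP]; simp, hlen, fun k hk => ?_⟩
        rw [hst k hk, pvElig_succ]
        simp [hP]
      · have hPf : pvIsP2 (1 + n) = false := by rw [← Bool.not_eq_true]; exact hP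
        have hc : ¬((1 + n) &&& (1 + n - 1) = 0) := by
          intro h0
          apply hP
          unfold pvIsP2
          simpa using h0
        rw [if_neg hc]
        have hjj : (pvScatter p msg n).2.2 = pvDIdx (1 + n) := by
          rw [hj, pvDIdx_eq]
        refine ⟨by simp [hj, hcnt, hPf], ?_, by simp, fun k hk => ?_⟩
        · rw [hmap, hPf, ← hsl, hjj]
          simp
        · rw [List.getD_eq_getElem?_getD]
          have hk2 : k < ((List.range p).map (fun k =>
              if ((1 + n) >>> k) &&& 1 ≠ 0 then
                (pvScatter p msg n).1.getD k [] ++ [msg.getD (pvScatter p msg n).2.2 ' ']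
              else (pvScatter p msg n).1.getD k [])).length := by
            simpa using hk
          rw [List.getElem?_eq_getElem hk2]
          simp only [List.getElem_map, List.getElem_range, Option.getD_some]
          rw [hst k hk, hjj, pvElig_succ, hPf, hit_eq]
          by_cases ht : (1 + n).testBit k = true
          · rw [ht]
            simp
          · have htf : (1 + n).testBit k = false := by rw [← Bool.not_eq_true]; exact ht
            rw [htf]
            simp only [Bool.and_false, if_neg (Bool.false_ne_true), List.append_nil]
            simp

lemma pvFillPar_succ (n : Nat) (st : List (List Char)) (sl : List (Option String)) :
    pvFillPar (n + 1) st sl =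
      (pvFillPar n st sl).set ((1 <<< n) - 1)
        (some (String.singleton (pvRed (st.getD n [])))) := by
  unfold pvFillPar
  rw [List.range_succ, List.foldl_concat]

lemma pvFillPar_spec (st : List (List Char)) (sl : List (Option String)) :
    ∀ n, (∀ k, k < n → 2 ^ k - 1 < sl.length) →
      (pvFillPar n st sl).length = sl.length ∧
      ∀ i, (pvFillPar n st sl)[i]? =
        if ∃ k < n, i + 1 = 2 ^ k then
          some (some (String.singleton (pvRed (st.getD (Nat.log 2 (i + 1)) []))))
        else sl[i]? := by
  intro n
  induction n with
  | zero =>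
      intro _
      refine ⟨rfl, fun i => ?_⟩
      rw [if_neg (by rintro ⟨k, hk, _⟩; omega)]
      rfl
  | succ n ih =>
      intro hidx
      obtain ⟨hlen, hget⟩ := ih (fun k hk => hidx k (by omega))
      rw [pvFillPar_succ]
      have hsl : (1 : Nat) <<< n = 2 ^ n := by rw [Nat.shiftLeft_eq, one_mul]
      have hpow : (1 : Nat) ≤ 2 ^ n := Nat.one_le_two_pow
      have hi2 : 2 ^ n - 1 < sl.length := hidx n (by omega)
      refine ⟨by simp [hlen], fun i => ?_⟩
      rw [List.getElem?_set]
      rcases eq_or_ne ((1 <<< n) - 1) i with he | hne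
      · rw [if_pos he, if_pos (by omega)]
        have hie : i + 1 = 2 ^ n := by omega
        rw [if_pos ⟨n, by omega, hie⟩, hie, Nat.log_pow (by norm_num)]
      · rw [if_neg hne, hget i]
        have hie : i + 1 ≠ 2 ^ n := by
          intro he2
          apply hne
          rw [hsl]
          omega
        by_cases h1 : ∃ k < n, i + 1 = 2 ^ k
        · rw [if_pos h1, if_pos (by obtain ⟨k, hk, he2⟩ := h1; exact ⟨k, by omega, he2⟩)]
        · rw [if_neg h1, if_neg (by
            rintro ⟨k, hk, he2⟩
            rcases Nat.lt_succ_iff_lt_or_eq.mp hk with h | rfl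
            · exact h1 ⟨k, h, he2⟩
            · exact hie he2)]

lemma pvB_eq_spec (msg : List Char) :
    (pvFillPar (pvPp msg) (pvScatter (pvPp msg) msg (pvT msg)).1
        (pvScatter (pvPp msg) msg (pvT msg)).2.1).map (fun s => s.getD "")
      = pvSpecStrs msg (pvT msg) := by
  obtain ⟨hj, hsl, hlenst, hst⟩ := pvScatter_spec (pvPp msg) msg (pvT msg)
  have hsllen : (pvScatter (pvPp msg) msg (pvT msg)).2.1.length = pvT msg := by
    rw [hsl]; simp
  have hidx : ∀ k, k < pvPp msg → 2 ^ k - 1 < (pvScatter (pvPp msg) msg (pvT msg)).2.1.length := by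
    intro k hk
    have := pvP_pow_le msg.length k hk
    have hpow : (1 : Nat) ≤ 2 ^ k := Nat.one_le_two_pow
    rw [hsllen]
    have hp : pvPp msg = pvPLoop msg.length (msg.length + 2) 0 := rfl
    have ht : pvT msg = msg.length + pvPLoop msg.length (msg.length + 2) 0 := rfl
    omega
  obtain ⟨hflen, hfget⟩ := pvFillPar_spec _ _ (pvPp msg) hidx
  apply List.ext_getElem?
  intro i
  rw [List.getElem?_map]
  unfold pvSpecStrs
  rw [List.getElem?_map]
  by_cases hi : i < pvT msg
  · have hr : (List.range' 1 (pvT msg))[i]? = some (1 + i) := by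
      rw [List.getElem?_eq_getElem (by simpa using hi)]
      simp [List.getElem_range']
    rw [hr, hfget i]
    by_cases hex : ∃ k < pvPp msg, i + 1 = 2 ^ k
    · obtain ⟨k, hk, he⟩ := hex
      have hlog : Nat.log 2 (i + 1) = k := by rw [he, Nat.log_pow (by norm_num)]
      have hP : pvIsP2 (i + 1) = true := (pow2_iff (i + 1) (by omega)).mpr ⟨k, he⟩
      rw [if_pos ⟨k, hk, he⟩, hlog, hst k hk, pvRed_eq]
      simp only [Option.map_some, Option.getD_some]
      rw [show (1 : Nat) + i = i + 1 from Nat.add_comm 1 i, hP]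
      simp [pvParChar, hlog]
    · have hP : pvIsP2 (i + 1) = false := by
        rw [← Bool.not_eq_true]
        intro hp
        exact hex ((pvExists_lt msg (i + 1) (by omega) (by omega)).mpr hp)
      rw [if_neg hex, hsl, List.getElem?_map, hr]
      simp only [Option.map_some, Option.getD_some]
      rw [show (1 : Nat) + i = i + 1 from Nat.add_comm 1 i, hP]
      simp
  · have h1 : (pvFillPar (pvPp msg) (pvScatter (pvPp msg) msg (pvT msg)).1
        (pvScatter (pvPp msg) msg (pvT msg)).2.1)[i]? = none := by
      rw [List.getElem?_eq_none]
      rw [hflen, hsllen]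
      omega
    have h2 : (List.range' 1 (pvT msg))[i]? = none := by
      rw [List.getElem?_eq_none]
      simpa using hi
    rw [h1, h2]
    rfl

-- ===== VERDICT (by name: the statement is the Claim_ definition above) =====
theorem hamming_emit_spec : Claim_equal_hamming_emit := by
  intro msg_bits verbose _
  show hamming_emit msg_bits verbose = hamming_emit_alt msg_bits verbose
  unfold hamming_emit hamming_emit_alt
  exact congrArg (PySem.Str.join "")
    ((pvA_eq_spec msg_bits.toList).trans (pvB_eq_spec msg_bits.toList).symm)
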